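-- pv_equiv track=rewrite | github.com/deesatzed/imbora | src/security/policy.py | _skip_env_assignments
-- ===== SOURCE A (Python) =====
-- def _skip_env_assignments(command_segment: str) -> str:
--     rest = command_segment.strip()
--     while rest:
--         parts = rest.split(maxsplit=1)
--         word = parts[0]
--         if "=" in word and (word[0].isalpha() or word[0] == "_"):
--             rest = parts[1] if len(parts) > 1 else ""
--             rest = rest.lstrip()
--             continue
--         return rest
--     return ""
-- ===== SOURCE B (Python) =====
-- def _skip_env_assignments(command_segment: str) -> str:
--     # Single index scan over the stripped string: walk token by token, never
--     # re-splitting or re-copying the remainder like repeated split(maxsplit=1) does.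
--     s = command_segment.strip()
--     n = len(s)
--     i = 0
--     while True:
--         start = i
--         while i < n and not s[i].isspace():
--             i += 1
--         tok = s[start:i]
--         if not tok or '=' not in tok or not (tok[0].isalpha() or tok[0] == '_'):
--             return s[start:]
--         while i < n and s[i].isspace():
--             i += 1
-- ===== Notes on version B (the rewrite author's own statement) =====
-- stated objective: alternative
-- what changed: Replaces the repeated rest.split(maxsplit=1)/lstrip loop, which re-copies the remainder string on every iteration, with a single left-to-right index scan over the stripped string that walks token boundaries and returns the tail slice once.
import Mathlib
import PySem

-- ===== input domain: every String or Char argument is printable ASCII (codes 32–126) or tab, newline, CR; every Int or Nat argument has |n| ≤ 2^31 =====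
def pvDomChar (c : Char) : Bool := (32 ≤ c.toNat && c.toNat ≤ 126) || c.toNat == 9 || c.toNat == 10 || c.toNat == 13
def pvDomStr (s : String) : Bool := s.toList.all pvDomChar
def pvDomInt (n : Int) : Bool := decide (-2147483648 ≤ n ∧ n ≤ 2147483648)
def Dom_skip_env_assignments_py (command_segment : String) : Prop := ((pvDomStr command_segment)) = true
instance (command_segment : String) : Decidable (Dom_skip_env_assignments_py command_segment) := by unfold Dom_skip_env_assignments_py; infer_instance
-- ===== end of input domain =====

-- B replaces A's repeated rest.split(maxsplit=1)/lstrip loop (which re-copies the remainder each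
-- iteration) with a single left-to-right index scan over the stripped string (alternative algorithm;
-- not measured faster).

-- ===== PORT A =====
-- A's while-loop: fuel = rest.length + 1 is enough, each iteration strictly shortens rest
-- (the fuel-0 branch is unreachable; fuel only makes the same computation total).
def pvLoopA : Nat → List Char → List Char
  | 0, rest => rest
  | Nat.succ fuel, rest =>
    if rest = [] then []
    else
      let parts := PySem.Chars.split₀Max rest 1
      let word := (PySem.List.pyGet? parts 0).getD []
      -- word[0]: parts[0] of a nonempty, non-whitespace-leading rest is nonempty, so no IndexError
      let c0 := (PySem.List.pyGet? word 0).getD ' '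
      if PySem.Chars.isIn ['='] word && (PySem.Chars.isalpha c0 || c0 == '_') then
        let rest1 := if parts.length > 1 then (PySem.List.pyGet? parts 1).getD [] else []
        pvLoopA fuel (PySem.Chars.lstrip rest1)
      else rest

def skip_env_assignments_py (command_segment : String) : String :=
  let rest := PySem.Chars.strip command_segment.toList
  String.ofList (pvLoopA (rest.length + 1) rest)

-- ===== PORT B =====
-- B's 'while True' loop over the index i; the suffix s[i:] is the loop state here
-- (tok = s[start:i] is takeWhile, the two inner index scans are the two dropWhiles).
def pvLoopB : Nat → List Char → List Char
  | 0, s => s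
  | Nat.succ fuel, s =>
    let tok := s.takeWhile (fun c => !PySem.Chars.isspace c)
    match tok with
    | [] => s
    | c :: _ =>
      if PySem.Chars.isIn ['='] tok && (PySem.Chars.isalpha c || c == '_') then
        pvLoopB fuel (List.dropWhile PySem.Chars.isspace (s.dropWhile (fun c => !PySem.Chars.isspace c)))
      else s

def skip_env_assignments_py_alt (command_segment : String) : String :=
  let s := PySem.Chars.strip command_segment.toList
  String.ofList (pvLoopB (s.length + 1) s)

-- ===== PRECONDITION & SPEC =====
def Spec_skip_env_assignments_py (command_segment : String) (out : String) : Prop := out = skip_env_assignments_py_alt command_segment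
instance (command_segment : String) (out : String) : Decidable (Spec_skip_env_assignments_py command_segment out) := by unfold Spec_skip_env_assignments_py; infer_instance

-- ===== CLAIM (what is proved, stated in full; the proofs are below) =====
def Claim_equal_skip_env_assignments_py : Prop := ∀ (command_segment : String), Dom_skip_env_assignments_py command_segment → Spec_skip_env_assignments_py command_segment (skip_env_assignments_py command_segment)

-- ===== LEMMAS AND PROOFS =====

-- a list equal to its own whitespace-dropWhile cannot start with whitespace
theorem pv_head_not_space (c : Char) (t : List Char)
    (h : List.dropWhile PySem.Chars.isspace (c :: t) = c :: t) :
    PySem.Chars.isspace c = false := by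
  by_contra hcc
  rw [Bool.not_eq_false] at hcc
  simp only [List.dropWhile_cons, hcc, if_true] at h
  have h1 := List.length_dropWhile_le PySem.Chars.isspace t
  have h2 := congrArg List.length h
  simp at h2; omega

-- a prefix of a list with no leading whitespace has no leading whitespace
theorem pv_prefix_noLead (y l : List Char) (h : y <+: l)
    (hl : l.dropWhile PySem.Chars.isspace = l) : y.dropWhile PySem.Chars.isspace = y := by
  cases y with
  | nil => simp
  | cons c t =>
    obtain ⟨rest, hr⟩ := h
    subst hr
    have hc := pv_head_not_space c (t ++ rest) hl
    simp [hc]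

-- strip leaves no leading whitespace
theorem pv_strip_noLead (l : List Char) :
    (PySem.Chars.strip l).dropWhile PySem.Chars.isspace = PySem.Chars.strip l := by
  have h1 : (PySem.Chars.lstrip l).dropWhile PySem.Chars.isspace = PySem.Chars.lstrip l := by
    simp [PySem.Chars.lstrip, List.dropWhile_idempotent]
  have hpref : PySem.Chars.strip l <+: PySem.Chars.lstrip l := by
    have hsuf := List.dropWhile_suffix (l := (PySem.Chars.lstrip l).reverse) (p := PySem.Chars.isspace)
    simp only [PySem.Chars.strip, PySem.Chars.rstrip]
    exact List.reverse_suffix.mp (by simpa using hsuf)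
  exact pv_prefix_noLead _ _ hpref h1

-- one unfolding step of split₀Max's worker
theorem pv_go_succ (fuel m : Nat) (l : List Char) (acc : List (List Char)) :
    PySem.Chars.split₀Max.go (fuel + 1) m l acc =
      match List.dropWhile PySem.Chars.isspace l with
      | [] => acc.reverse
      | l' =>
        if m = 0 then (l' :: acc).reverse
        else PySem.Chars.split₀Max.go fuel (m - 1)
          (List.dropWhile (fun c => !PySem.Chars.isspace c) l')
          (List.takeWhile (fun c => !PySem.Chars.isspace c) l' :: acc) := by
  rw [PySem.Chars.split₀Max.go.eq_def]
  rfl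

-- characterisation of rest.split(maxsplit=1) on a rest with no leading whitespace
theorem pv_split1 (s : List Char) (h : s.dropWhile PySem.Chars.isspace = s) :
    PySem.Chars.split₀Max s 1 =
      if s = [] then []
      else
        let w := s.takeWhile (fun c => !PySem.Chars.isspace c)
        let r := (s.dropWhile (fun c => !PySem.Chars.isspace c)).dropWhile PySem.Chars.isspace
        if r = [] then [w] else [w, r] := by
  have h0 : PySem.Chars.split₀Max s 1 = PySem.Chars.split₀Max.go (s.length + 1) 1 s [] := by
    simp [PySem.Chars.split₀Max]
  rw [h0, pv_go_succ, h]
  cases s with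
  | nil => simp
  | cons c t =>
    simp only [List.length_cons, reduceCtorEq, if_false]
    rw [pv_go_succ]
    cases hr : ((c :: t).dropWhile (fun c => !PySem.Chars.isspace c)).dropWhile PySem.Chars.isspace with
    | nil => simp
    | cons d u => simp

-- the two loops agree on any suffix with no leading whitespace, given enough fuel
theorem pv_loop_eq (fuel : Nat) (s : List Char) (hf : s.length < fuel)
    (h : s.dropWhile PySem.Chars.isspace = s) : pvLoopA fuel s = pvLoopB fuel s := by
  induction fuel generalizing s with
  | zero => omega
  | succ fuel ih =>
    cases s with
    | nil => simp [pvLoopA, pvLoopB]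
    | cons c t =>
      have hc : PySem.Chars.isspace c = false := pv_head_not_space c t h
      have hsplit := pv_split1 (c :: t) h
      rw [if_neg (by simp)] at hsplit
      simp only at hsplit
      have htok : (c :: t).takeWhile (fun c => !PySem.Chars.isspace c) =
          c :: t.takeWhile (fun c => !PySem.Chars.isspace c) := by
        rw [List.takeWhile_cons, if_pos (by simp [hc])]
      set w := (c :: t).takeWhile (fun c => !PySem.Chars.isspace c) with hw
      set r := ((c :: t).dropWhile (fun c => !PySem.Chars.isspace c)).dropWhile PySem.Chars.isspace with hrdef
      have hrlen : r.length < t.length + 1 := by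
        have h1 : (c :: t).dropWhile (fun c => !PySem.Chars.isspace c) =
            t.dropWhile (fun c => !PySem.Chars.isspace c) := by
          rw [List.dropWhile_cons, if_pos (by simp [hc])]
        have h2 := List.length_dropWhile_le (fun c => !PySem.Chars.isspace c) t
        have h3 := List.length_dropWhile_le PySem.Chars.isspace ((c :: t).dropWhile (fun c => !PySem.Chars.isspace c))
        rw [h1] at h3
        rw [hrdef, h1]
        omega
      have hrno : r.dropWhile PySem.Chars.isspace = r := by
        rw [hrdef]; exact List.dropWhile_idempotent _ _
      have hA : pvLoopA (fuel + 1) (c :: t) =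
          if PySem.Chars.isIn ['='] w && (PySem.Chars.isalpha c || c == '_') then
            pvLoopA fuel r
          else c :: t := by
        rw [pvLoopA]
        rw [if_neg (by simp)]
        simp only [hsplit]
        by_cases hr0 : r = []
        · rw [if_pos hr0]
          simp only [PySem.List.pyGet?, PySem.List.pyIdx?]
          simp [htok, hr0, PySem.Chars.lstrip]
        · rw [if_neg hr0]
          simp only [PySem.List.pyGet?, PySem.List.pyIdx?]
          simp [htok, PySem.Chars.lstrip, hrno]
      have hB : pvLoopB (fuel + 1) (c :: t) =
          if PySem.Chars.isIn ['='] w && (PySem.Chars.isalpha c || c == '_') then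
            pvLoopB fuel r
          else c :: t := by
        rw [pvLoopB]
        simp only [← hw, htok, ← hrdef]
      rw [hA, hB]
      split_ifs with hcond
      · exact ih r (by simp only [List.length_cons] at hf; omega) hrno
      · rfl

-- ===== VERDICT (by name: the statement is the Claim_ definition above) =====
theorem skip_env_assignments_py_spec : Claim_equal_skip_env_assignments_py := by
  intro cs _
  unfold Spec_skip_env_assignments_py skip_env_assignments_py skip_env_assignments_py_alt
  simp only []
  rw [pv_loop_eq ((PySem.Chars.strip cs.toList).length + 1) (PySem.Chars.strip cs.toList)
    (by omega) (pv_strip_noLead _)]
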